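-- pv_equiv track=rewrite | github.com/daniel-reich/ubiquitous-fiesta | 68omQmgQEwv8558ZK_5.py | max_stats
-- ===== SOURCE A (Python) =====
-- def max_stats(character, gold):
--     attack, defense, speed = 0, 1, 2
--     value, gold_idx = 0, 1
--     characters = {'Knight': [120, 140, 6],
--                   'Warrior': [180, 71, 8],
--                   'Fairy': [71, 100, 16],
--                   'Robot': [160, 120, 11],
--                   'Giant': [160, 200, 4]}
--     weapons = [[10, 20], [20, 40], [30, 60], [40, 80], [50, 100]]
--     armor = [[20, 30], [40, 60], [60, 90], [80, 120], [100, 150]]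
--     boots = [[3, 24], [6, 48], [9, 72], [12, 96], [15, 120]]
--     result = characters[character]
--     idx = -1
--     while idx < 4:
--         if weapons[idx + 1][gold_idx] <= gold:
--             idx += 1
--         else:
--             break
--     if idx > -1:
--         result[attack] += weapons[idx][value]
--     idx = -1
--     while idx < 4:
--         if armor[idx + 1][gold_idx] <= gold:
--             idx += 1
--         else:
--             break
--     if idx > -1:
--         result[defense] += armor[idx][value]
--     idx = -1
--     while idx < 4:
--         if boots[idx + 1][gold_idx] <= gold:
--             idx += 1
--         else:
--             break
--     if idx > -1:
--         result[speed] += boots[idx][value]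
--     return result
-- ===== SOURCE B (Python) =====
-- def max_stats(character, gold):
--     # Each equipment table is an arithmetic progression: cost = step * tier, value = unit * tier
--     # (weapons: step 20/unit 10, armor: step 30/unit 20, boots: step 24/unit 3, tiers 1..5).
--     # So the best affordable bonus is unit * clamp(gold // step, 0, 5) — no table scan at all.
--     characters = {'Knight': [120, 140, 6],
--                   'Warrior': [180, 71, 8],
--                   'Fairy': [71, 100, 16],
--                   'Robot': [160, 120, 11],
--                   'Giant': [160, 200, 4]}
--     attack, defense, speed = characters[character]
--     def bonus(unit, step):
--         return unit * max(0, min(gold // step, 5))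
--     return [attack + bonus(10, 20), defense + bonus(20, 30), speed + bonus(3, 24)]
-- ===== Notes on version B (the rewrite author's own statement) =====
-- stated objective: simpler
-- what changed: Replaces A's three copy-pasted climbing-index while-loops over equipment tables by a closed-form arithmetic computation: each table is an arithmetic progression, so each bonus is unit * clamp(gold // step, 0, 5) and the tables disappear entirely.
-- outside the precondition, e.g. on max_stats('Wizard', 50): A raises KeyError, B raises KeyError
import Mathlib
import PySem

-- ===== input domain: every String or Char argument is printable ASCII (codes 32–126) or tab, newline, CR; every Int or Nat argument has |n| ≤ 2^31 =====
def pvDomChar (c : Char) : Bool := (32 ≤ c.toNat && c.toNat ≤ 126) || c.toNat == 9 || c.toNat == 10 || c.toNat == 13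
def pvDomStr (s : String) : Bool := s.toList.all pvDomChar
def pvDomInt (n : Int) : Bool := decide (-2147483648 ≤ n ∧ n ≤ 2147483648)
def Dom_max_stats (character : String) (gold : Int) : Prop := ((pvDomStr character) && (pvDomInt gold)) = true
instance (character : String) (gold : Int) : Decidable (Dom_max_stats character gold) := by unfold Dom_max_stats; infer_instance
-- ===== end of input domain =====

-- B replaces A's three table-scanning while-loops by a closed-form arithmetic computation:
-- each table is an arithmetic progression, so the bonus is unit * clamp(gold // step, 0, 5)
-- (objective: simpler; no tables, no loops).

-- ===== PORT A =====
-- the five characters dict of A (tiers below are (value, cost) pairs, Python's 2-element lists)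
def pvCharsA : PySem.Dict String (List Int) :=
  PySem.Dict.ofList [("Knight", [120, 140, 6]), ("Warrior", [180, 71, 8]),
                     ("Fairy", [71, 100, 16]), ("Robot", [160, 120, 11]), ("Giant", [160, 200, 4])]

-- A's 'while idx < 4: if table[idx+1][1] <= gold: idx += 1 else: break', fuel 5 ≥ loop bound;
-- the .getD (0,0) default is unreachable (idx+1 ∈ [0,4] on a 5-element table).
def pvClimb (table : List (Int × Int)) (gold : Int) : Nat → Int → Int
  | 0, idx => idx
  | n + 1, idx =>
    if idx < 4 then
      if ((PySem.List.pyGet? table (idx + 1)).getD (0, 0)).2 ≤ gold then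
        pvClimb table gold n (idx + 1)
      else idx
    else idx

def max_stats (character : String) (gold : Int) : List Int :=
  let weapons : List (Int × Int) := [(10, 20), (20, 40), (30, 60), (40, 80), (50, 100)]
  let armor : List (Int × Int) := [(20, 30), (40, 60), (60, 90), (80, 120), (100, 150)]
  let boots : List (Int × Int) := [(3, 24), (6, 48), (9, 72), (12, 96), (15, 120)]
  -- characters[character]: KeyError (excluded by Pre_) modelled by the unreachable [] default
  let result := (pvCharsA.get? character).getD []
  let idx1 := pvClimb weapons gold 5 (-1)
  let result := if idx1 > -1 then
      result.modify 0 (fun v => v + ((PySem.List.pyGet? weapons idx1).getD (0, 0)).1) else result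
  let idx2 := pvClimb armor gold 5 (-1)
  let result := if idx2 > -1 then
      result.modify 1 (fun v => v + ((PySem.List.pyGet? armor idx2).getD (0, 0)).1) else result
  let idx3 := pvClimb boots gold 5 (-1)
  let result := if idx3 > -1 then
      result.modify 2 (fun v => v + ((PySem.List.pyGet? boots idx3).getD (0, 0)).1) else result
  result

-- ===== PORT B =====
def pvCharsB : PySem.Dict String (List Int) :=
  PySem.Dict.ofList [("Knight", [120, 140, 6]), ("Warrior", [180, 71, 8]),
                     ("Fairy", [71, 100, 16]), ("Robot", [160, 120, 11]), ("Giant", [160, 200, 4])]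

-- B's helper: bonus unit step = unit * max(0, min(gold // step, 5))
def pvBonus (gold unit step : Int) : Int :=
  unit * max 0 (min (PySem.Int.floordiv gold step) 5)

def max_stats_alt (character : String) (gold : Int) : List Int :=
  -- 'attack, defense, speed = characters[character]' unpacks a 3-list;
  -- the '_ => []' branch is unreachable inside Pre_ (KeyError excluded there)
  match (pvCharsB.get? character).getD [] with
  | [attack, defense, speed] =>
      [attack + pvBonus gold 10 20, defense + pvBonus gold 20 30, speed + pvBonus gold 3 24]
  | _ => []

-- ===== PRECONDITION & SPEC =====
-- Pre_ excludes exactly the inputs where A raises KeyError: character not one of the five keys.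
def Pre_max_stats (character : String) (gold : Int) : Prop :=
  character = "Knight" ∨ character = "Warrior" ∨ character = "Fairy" ∨
  character = "Robot" ∨ character = "Giant"
instance (character : String) (gold : Int) : Decidable (Pre_max_stats character gold) := by
  unfold Pre_max_stats; infer_instance
def pvWitness_max_stats : String × Int := ("Knight", 50)

def Spec_max_stats (character : String) (gold : Int) (out : List Int) : Prop := out = max_stats_alt character gold
instance (character : String) (gold : Int) (out : List Int) : Decidable (Spec_max_stats character gold out) := by unfold Spec_max_stats; infer_instance

-- ===== CLAIM (what is proved, stated in full; the proofs are below) =====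
def Claim_equal_max_stats : Prop := ∀ (character : String) (gold : Int), Dom_max_stats character gold → Pre_max_stats character gold → Spec_max_stats character gold (max_stats character gold)

-- ===== LEMMAS AND PROOFS =====

-- per-table lemmas: A's climb-and-add step on [a,d,s] equals adding B's closed-form bonus
theorem pv_w (gold a d s : Int) :
    (let idx := pvClimb [(10, 20), (20, 40), (30, 60), (40, 80), (50, 100)] gold 5 (-1)
     if idx > -1 then
       ([a, d, s]).modify 0 (fun v => v + ((PySem.List.pyGet? [((10:Int), (20:Int)), (20, 40), (30, 60), (40, 80), (50, 100)] idx).getD (0, 0)).1)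
     else [a, d, s])
    = [a + pvBonus gold 10 20, d, s] := by
  have hd : PySem.Int.floordiv gold 20 = gold / 20 :=
    PySem.Int.floordiv_eq_ediv_of_pos (by omega)
  by_cases h1 : (20:Int) ≤ gold <;> by_cases h2 : (40:Int) ≤ gold <;>
  by_cases h3 : (60:Int) ≤ gold <;> by_cases h4 : (80:Int) ≤ gold <;>
  by_cases h5 : (100:Int) ≤ gold <;>
  first
  | omega
  | (simp [pvClimb, pvBonus, PySem.List.pyGet?, PySem.List.pyIdx?, List.modify, hd,
       h1, h2, h3, h4, h5]; omega)

theorem pv_a (gold a d s : Int) :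
    (let idx := pvClimb [(20, 30), (40, 60), (60, 90), (80, 120), (100, 150)] gold 5 (-1)
     if idx > -1 then
       ([a, d, s]).modify 1 (fun v => v + ((PySem.List.pyGet? [((20:Int), (30:Int)), (40, 60), (60, 90), (80, 120), (100, 150)] idx).getD (0, 0)).1)
     else [a, d, s])
    = [a, d + pvBonus gold 20 30, s] := by
  have hd : PySem.Int.floordiv gold 30 = gold / 30 :=
    PySem.Int.floordiv_eq_ediv_of_pos (by omega)
  by_cases h1 : (30:Int) ≤ gold <;> by_cases h2 : (60:Int) ≤ gold <;>
  by_cases h3 : (90:Int) ≤ gold <;> by_cases h4 : (120:Int) ≤ gold <;>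
  by_cases h5 : (150:Int) ≤ gold <;>
  first
  | omega
  | (simp [pvClimb, pvBonus, PySem.List.pyGet?, PySem.List.pyIdx?, List.modify, hd,
       h1, h2, h3, h4, h5]; omega)

theorem pv_b (gold a d s : Int) :
    (let idx := pvClimb [(3, 24), (6, 48), (9, 72), (12, 96), (15, 120)] gold 5 (-1)
     if idx > -1 then
       ([a, d, s]).modify 2 (fun v => v + ((PySem.List.pyGet? [((3:Int), (24:Int)), (6, 48), (9, 72), (12, 96), (15, 120)] idx).getD (0, 0)).1)
     else [a, d, s])
    = [a, d, s + pvBonus gold 3 24] := by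
  have hd : PySem.Int.floordiv gold 24 = gold / 24 :=
    PySem.Int.floordiv_eq_ediv_of_pos (by omega)
  by_cases h1 : (24:Int) ≤ gold <;> by_cases h2 : (48:Int) ≤ gold <;>
  by_cases h3 : (72:Int) ≤ gold <;> by_cases h4 : (96:Int) ≤ gold <;>
  by_cases h5 : (120:Int) ≤ gold <;>
  first
  | omega
  | (simp [pvClimb, pvBonus, PySem.List.pyGet?, PySem.List.pyIdx?, List.modify, hd,
       h1, h2, h3, h4, h5]; omega)

theorem pv_base (c : String) (gold a d s : Int)
    (hA : (pvCharsA.get? c).getD [] = [a, d, s])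
    (hB : (pvCharsB.get? c).getD [] = [a, d, s]) :
    max_stats c gold = max_stats_alt c gold := by
  simp only [max_stats, max_stats_alt, hA, hB, pv_w, pv_a, pv_b]

-- ===== VERDICT (by name: the statement is the Claim_ definition above) =====
theorem max_stats_spec : Claim_equal_max_stats := by
  intro character gold _ hp
  rcases hp with h | h | h | h | h <;> subst h
  · exact pv_base _ gold 120 140 6 (by decide) (by decide)
  · exact pv_base _ gold 180 71 8 (by decide) (by decide)
  · exact pv_base _ gold 71 100 16 (by decide) (by decide)
  · exact pv_base _ gold 160 120 11 (by decide) (by decide)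
  · exact pv_base _ gold 160 200 4 (by decide) (by decide)
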